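-- pv_equiv track=rewrite | github.com/hoseinvsc/testing-python | test16.py | balance_founder
-- ===== SOURCE A (Python) =====
-- def balance_founder(file2, balance2):
--     counter = 0
--     for char in file2:
--         counter = counter + 1
--
--         if char == "(":
--             balance2 = balance2 + 1
--         elif char == ")":
--             balance2 = balance2 - 1
--         if balance2 == 12:
--             return counter
-- ===== SOURCE B (Python) =====
-- def balance_founder(file2, balance2):
--     deltas = [1 if c == "(" else (-1 if c == ")" else 0) for c in file2]
--     prefix = []
--     run = balance2
--     for d in deltas:
--         run += d
--         prefix.append(run)
--     for i, v in enumerate(prefix):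
--         if v == 12:
--             return i + 1
--     return None
-- ===== Notes on version B (the rewrite author's own statement) =====
-- stated objective: alternative
-- what changed: Replaces the fused early-return loop over characters with a build-then-search decomposition: map chars to deltas, accumulate a prefix table of running balances, then scan the table for the first entry equal to 12.
import Mathlib
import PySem

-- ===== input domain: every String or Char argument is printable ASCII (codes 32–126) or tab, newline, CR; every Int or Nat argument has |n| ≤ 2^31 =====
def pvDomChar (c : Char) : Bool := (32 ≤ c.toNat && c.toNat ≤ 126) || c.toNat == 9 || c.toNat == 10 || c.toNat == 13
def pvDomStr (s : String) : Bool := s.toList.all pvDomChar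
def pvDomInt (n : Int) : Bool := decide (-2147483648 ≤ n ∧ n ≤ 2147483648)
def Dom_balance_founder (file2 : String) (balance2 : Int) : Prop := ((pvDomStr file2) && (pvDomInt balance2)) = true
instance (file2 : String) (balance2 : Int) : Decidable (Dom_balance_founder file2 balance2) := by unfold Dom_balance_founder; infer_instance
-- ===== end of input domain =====

-- B replaces A's fused early-return loop by a build-a-prefix-table-then-search decomposition (alternative, same cost).


-- ===== PORT A =====
-- A's loop: increment counter, update balance by branch, early-return counter when balance hits 12.
def balanceFounderLoopA : List Char → Int → Int → Option Int
  | [], _, _ => none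
  | c :: rest, counter, bal =>
    let counter := counter + 1
    let bal := if c = '(' then bal + 1 else if c = ')' then bal - 1 else bal
    if bal = 12 then some counter else balanceFounderLoopA rest counter bal

def balance_founder (file2 : String) (balance2 : Int) : Option Int :=
  balanceFounderLoopA file2.toList 0 balance2

-- ===== PORT B =====
-- B: deltas list, prefix table of running balances, then search for the first 12.
def bfDelta (c : Char) : Int := if c = '(' then 1 else if c = ')' then -1 else 0

def bfAccum : List Int → Int → List Int
  | [], _ => []
  | d :: ds, run => (run + d) :: bfAccum ds (run + d)

def bfSearch : List Int → Nat → Option Int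
  | [], _ => none
  | v :: vs, i => if v = 12 then some ((i : Int) + 1) else bfSearch vs (i + 1)

def balance_founder_alt (file2 : String) (balance2 : Int) : Option Int :=
  bfSearch (bfAccum (file2.toList.map bfDelta) balance2) 0

-- ===== PRECONDITION & SPEC =====
def Spec_balance_founder (file2 : String) (balance2 : Int) (out : Option Int) : Prop := out = balance_founder_alt file2 balance2
instance (file2 : String) (balance2 : Int) (out : Option Int) : Decidable (Spec_balance_founder file2 balance2 out) := by unfold Spec_balance_founder; infer_instance

-- ===== CLAIM (what is proved, stated in full; the proofs are below) =====
def Claim_equal_balance_founder : Prop := ∀ (file2 : String) (balance2 : Int), Dom_balance_founder file2 balance2 → Spec_balance_founder file2 balance2 (balance_founder file2 balance2)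

-- ===== LEMMAS AND PROOFS =====
theorem bf_loop_eq (cs : List Char) : ∀ (n : Nat) (bal : Int),
    balanceFounderLoopA cs (n : Int) bal = bfSearch (bfAccum (cs.map bfDelta) bal) n := by
  induction cs with
  | nil => intro n bal; rfl
  | cons c rest ih =>
    intro n bal
    have hδ : (if c = '(' then bal + 1 else if c = ')' then bal - 1 else bal) = bal + bfDelta c := by
      unfold bfDelta; split_ifs <;> ring
    simp only [balanceFounderLoopA, List.map, bfAccum, bfSearch, hδ]
    by_cases h : bal + bfDelta c = 12
    · simp [h]
    · simp only [h, if_false]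
      have := ih (n + 1) (bal + bfDelta c)
      push_cast at this ⊢
      simpa using this

-- ===== VERDICT (by name: the statement is the Claim_ definition above) =====
theorem balance_founder_spec : Claim_equal_balance_founder := by
  intro file2 balance2 _
  unfold Spec_balance_founder balance_founder balance_founder_alt
  simpa using bf_loop_eq file2.toList 0 balance2
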